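-- pv_equiv track=rewrite | github.com/ccookie0415/Baekjoon | 프로그래머스/2/132265. 롤케이크 자르기/롤케이크 자르기.py | solution
-- ===== SOURCE A (Python) =====
-- from collections import Counter
--
-- def solution(topping):
--     n = len(topping)
--     topping_set = set(topping)
--     answer = 0
--
--     left_counter = Counter()
--     right_counter = Counter(topping)
--
--     for i in range(n-1):
--         left_counter[topping[i]] += 1
--         right_counter[topping[i]] -= 1
--
--         if right_counter[topping[i]] == 0:
--             del right_counter[topping[i]]
--
--         if len(left_counter) == len(right_counter):
--             answer += 1
--
--     return answer
-- ===== SOURCE B (Python) =====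
-- def solution(topping):
--     # backward pass: ds[i] = number of distinct toppings in topping[i+1:]
--     seen = set()
--     ds = []
--     for x in reversed(topping):
--         ds.append(len(seen))
--         seen.add(x)
--     ds.reverse()
--     # forward pass over the n-1 cut points
--     prefix = set()
--     answer = 0
--     for x, d in zip(topping[:-1], ds):
--         prefix.add(x)
--         if len(prefix) == d:
--             answer += 1
--     return answer
-- ===== Notes on version B (the rewrite author's own statement) =====
-- stated objective: faster
-- what changed: A's single synchronized pass over two Counters (increment left, decrement right, delete zero entries, compare dict sizes each step) is replaced by two independent set-based passes: a backward pass precomputing a suffix-distinct-count table, then a forward prefix-set scan compared against that table.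
import Mathlib
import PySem

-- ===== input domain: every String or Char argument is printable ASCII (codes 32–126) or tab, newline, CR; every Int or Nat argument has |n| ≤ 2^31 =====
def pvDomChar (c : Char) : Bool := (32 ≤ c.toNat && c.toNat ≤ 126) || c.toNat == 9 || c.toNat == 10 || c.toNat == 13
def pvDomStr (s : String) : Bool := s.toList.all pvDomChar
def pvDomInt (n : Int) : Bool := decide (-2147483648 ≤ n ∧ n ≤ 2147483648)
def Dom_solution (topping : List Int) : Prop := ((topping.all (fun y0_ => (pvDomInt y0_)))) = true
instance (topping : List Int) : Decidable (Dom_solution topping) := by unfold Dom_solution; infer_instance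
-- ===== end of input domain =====

-- B replaces A's synchronized dual-Counter pass by a precomputed suffix-distinct table
-- consumed by a separate forward prefix-set scan (objective: alternative decomposition).

-- ===== PORT A =====
-- loop body of A: x = topping[i]; left_counter[x] += 1; right_counter[x] -= 1;
-- if right_counter[x] == 0: del right_counter[x]; if len(left)==len(right): answer += 1
def solnStepA (st : PySem.Dict Int Int × PySem.Dict Int Int × Int) (x : Int) :
    PySem.Dict Int Int × PySem.Dict Int Int × Int :=
  let left := st.1.modify x 0 (· + 1)
  let r1 := st.2.1.modify x 0 (· - 1)
  let right := if r1.getD x 0 = 0 then r1.erase x else r1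
  (left, right, if left.size = right.size then st.2.2 + 1 else st.2.2)

def solution (topping : List Int) : Int :=
  let n : Int := topping.length
  let _topping_set : PySem.Set Int := PySem.Set.ofList topping
  let init : PySem.Dict Int Int × PySem.Dict Int Int × Int :=
    (PySem.Dict.empty, PySem.Dict.counter topping, 0)
  let res := (PySem.List.pyRange 0 (n - 1) 1).foldl
    (fun st i => solnStepA st (PySem.List.pyGetD topping i 0)) init
  res.2.2

-- ===== PORT B =====
-- backward pass body: ds.append(len(seen)); seen.add(x)
def solnStepRev (st : PySem.Set Int × List Int) (x : Int) : PySem.Set Int × List Int :=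
  (st.1.add x, st.2 ++ [PySem.Set.len st.1])

-- forward pass body: prefix.add(x); if len(prefix) == d: answer += 1
def solnStepFw (st : PySem.Set Int × Int) (xd : Int × Int) : PySem.Set Int × Int :=
  let pre := st.1.add xd.1
  (pre, if PySem.Set.len pre = xd.2 then st.2 + 1 else st.2)

def solution_alt (topping : List Int) : Int :=
  let bk := topping.reverse.foldl solnStepRev (PySem.Set.empty, [])
  let ds := bk.2.reverse
  let fw := ((PySem.List.slice topping none (some (-1))).zip ds).foldl
    solnStepFw (PySem.Set.empty, 0)
  fw.2

-- ===== PRECONDITION & SPEC =====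
def Spec_solution (topping : List Int) (out : Int) : Prop := out = solution_alt topping
instance (topping : List Int) (out : Int) : Decidable (Spec_solution topping out) := by unfold Spec_solution; infer_instance

-- ===== CLAIM (what is proved, stated in full; the proofs are below) =====
def Claim_equal_solution : Prop := ∀ (topping : List Int), Dom_solution topping → Spec_solution topping (solution topping)

-- ===== LEMMAS AND PROOFS =====

-- number of distinct elements of a list
def cardL (l : List Int) : Nat := (PySem.Set.ofList l).length

-- common reference value: count the cut points with equally many distinct toppings on both sides
def refCount (t : List Int) : Int :=
  ((List.range (t.length - 1)).countP
    (fun j => cardL (t.take (j+1)) == cardL (t.drop (j+1))) : Nat)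

-- ---- facts about Dict.erase (the prelude has no erase lemmas) ----

lemma dict_get?_erase_of_ne (d : PySem.Dict Int Int) (k y : Int) (h : y ≠ k) :
    (d.erase k).get? y = d.get? y := by
  obtain ⟨items⟩ := d
  simp only [PySem.Dict.erase, PySem.Dict.get?, List.find?_filter]
  have : (fun (a : Int × Int) => decide ((!a.1 == k) = true ∧ (a.1 == y) = true))
       = (fun (p : Int × Int) => p.1 == y) := by
    funext a
    by_cases ha : a.1 = y
    · subst ha; simp [h]
    · simp [ha]
  rw [this]

lemma dict_get?_erase_self (d : PySem.Dict Int Int) (k : Int) :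
    (d.erase k).get? k = none := by
  obtain ⟨items⟩ := d
  simp only [PySem.Dict.erase, PySem.Dict.get?, Option.map_eq_none_iff]
  rw [List.find?_eq_none]
  intro p hp
  simp only [List.mem_filter] at hp
  simpa using hp.2

lemma dict_contains_erase (d : PySem.Dict Int Int) (k y : Int) :
    (d.erase k).contains y = true ↔ (y ≠ k ∧ d.contains y = true) := by
  obtain ⟨items⟩ := d
  simp only [PySem.Dict.erase, PySem.Dict.contains, List.any_eq_true, List.mem_filter]
  constructor
  · rintro ⟨p, ⟨hp, hpk⟩, hpy⟩
    refine ⟨?_, ⟨p, hp, hpy⟩⟩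
    simp only [beq_iff_eq] at hpy ⊢
    subst hpy; simpa using hpk
  · rintro ⟨hyk, p, hp, hpy⟩
    refine ⟨p, ⟨hp, ?_⟩, hpy⟩
    simp only [beq_iff_eq] at hpy
    subst hpy; simpa using hyk

lemma dict_keys_erase (d : PySem.Dict Int Int) (k : Int) :
    (d.erase k).keys = d.keys.filter (fun y => !(y == k)) := by
  obtain ⟨items⟩ := d
  simp only [PySem.Dict.erase, PySem.Dict.keys]
  induction items with
  | nil => rfl
  | cons hd tl ih => by_cases hk : hd.1 = k <;> simp [hk, ih]

lemma dict_nodup_keys_erase (d : PySem.Dict Int Int) (k : Int) (h : d.keys.Nodup) :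
    (d.erase k).keys.Nodup := by
  rw [dict_keys_erase]; exact h.filter _

lemma dict_nodup_keys_modify (d : PySem.Dict Int Int) (k : Int) (d0 : Int) (f : Int → Int)
    (h : d.keys.Nodup) : (d.modify k d0 f).keys.Nodup := by
  rw [PySem.Dict.keys_modify]
  by_cases hc : d.contains k = true
  · rw [PySem.Dict.keys_insert_of_contains _ _ hc]; exact h
  · rw [PySem.Dict.keys_insert_of_not_contains _ _ (by simpa using hc)]
    apply List.Nodup.append h (List.nodup_singleton _)
    intro x hx hk2
    rw [List.mem_singleton] at hk2
    exact hc ((PySem.Dict.contains_iff_mem_keys d k).2 (hk2 ▸ hx))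

lemma dict_size_eq_cardL (d : PySem.Dict Int Int) (l : List Int) (hnd : d.keys.Nodup)
    (h : ∀ x, d.contains x = true ↔ x ∈ l) : d.size = cardL l := by
  have hperm : d.keys.Perm (PySem.Set.ofList l) := by
    rw [List.perm_ext_iff_of_nodup hnd (PySem.Set.nodup_ofList l)]
    intro a
    rw [← PySem.Dict.contains_iff_mem_keys, h, PySem.Set.mem_ofList]
  have hlen : d.keys.length = cardL l := hperm.length_eq
  simpa [PySem.Dict.keys, PySem.Dict.size] using hlen

lemma cardL_reverse (l : List Int) : cardL l.reverse = cardL l := by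
  have hperm : (PySem.Set.ofList l.reverse).Perm (PySem.Set.ofList l) := by
    rw [List.perm_ext_iff_of_nodup (PySem.Set.nodup_ofList _) (PySem.Set.nodup_ofList l)]
    intro a
    simp [PySem.Set.mem_ofList]
  exact hperm.length_eq

-- ---- the invariant of A's single dual-counter pass ----
lemma A_loop (s : List Int) : ∀ (e : Int) (p : List Int) (left right : PySem.Dict Int Int) (a : Int),
    left.keys.Nodup → (∀ x, left.contains x = true ↔ x ∈ p) →
    right.keys.Nodup →
    (∀ x, right.getD x 0 = ((s ++ [e]).count x : Int)) →
    (∀ x, right.contains x = true ↔ x ∈ (s ++ [e])) →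
    (s.foldl solnStepA (left, right, a)).2.2
      = a + ((List.range s.length).countP
          (fun j => cardL (p ++ s.take (j+1)) == cardL (s.drop (j+1) ++ [e])) : Nat) := by
  induction s with
  | nil => intro e p left right a _ _ _ _ _; simp
  | cons x s' ih =>
    intro e p left right a hLnd hL hRnd hRc hRm
    rw [List.foldl_cons]
    have hcons : (x :: s') ++ [e] = x :: (s' ++ [e]) := by simp
    rw [hcons] at hRc hRm
    -- the new state
    set left' := left.modify x 0 (· + 1) with hleft'
    set r1 := right.modify x 0 (· - 1) with hr1
    set right' := if r1.getD x 0 = 0 then r1.erase x else r1 with hright'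
    have hstep : solnStepA (left, right, a) x
        = (left', right', if left'.size = right'.size then a + 1 else a) := rfl
    rw [hstep]
    -- left invariants
    have hLnd' : left'.keys.Nodup := dict_nodup_keys_modify left x 0 _ hLnd
    have hL' : ∀ z, left'.contains z = true ↔ z ∈ p ++ [x] := by
      intro z
      rw [hleft', PySem.Dict.contains_modify]
      simp [hL z, or_comm]
    -- r1 counts
    have hr1c : ∀ z, r1.getD z 0 = (((s' ++ [e]).count z : Int)) := by
      intro z
      rw [hr1, PySem.Dict.getD_modify]
      by_cases hz : z = x
      · subst hz; rw [if_pos rfl, hRc]; simp [List.count_cons]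
      · rw [if_neg hz, hRc]; simp [List.count_cons, Ne.symm hz]
    have hr1m : ∀ z, r1.contains z = true ↔ (z = x ∨ z ∈ s' ++ [e]) := by
      intro z
      rw [hr1, PySem.Dict.contains_modify]
      simp [hRm z]
    -- right invariants
    have hr1nd : r1.keys.Nodup := dict_nodup_keys_modify right x 0 _ hRnd
    have hR'nd : right'.keys.Nodup := by
      rw [hright']; split_ifs
      · exact dict_nodup_keys_erase _ _ hr1nd
      · exact hr1nd
    have hR'c : ∀ z, right'.getD z 0 = ((s' ++ [e]).count z : Int) := by
      intro z
      rw [hright']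
      split_ifs with h0
      · by_cases hzx : z = x
        · subst hzx
          rw [PySem.Dict.getD_eq_get?_getD, dict_get?_erase_self]
          have : ((s' ++ [e]).count z : Int) = 0 := by rw [← hr1c z, h0]
          simpa using this.symm
        · rw [PySem.Dict.getD_eq_get?_getD, dict_get?_erase_of_ne _ _ _ hzx,
              ← PySem.Dict.getD_eq_get?_getD, hr1c]
      · exact hr1c z
    have hR'm : ∀ z, right'.contains z = true ↔ z ∈ s' ++ [e] := by
      intro z
      rw [hright']
      split_ifs with h0
      · have hx0 : x ∉ s' ++ [e] := by
          have h1 : ((s' ++ [e]).count x : Int) = 0 := by rw [← hr1c x, h0]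
          have h2 : (s' ++ [e]).count x = 0 := by exact_mod_cast h1
          exact List.count_eq_zero.mp h2
        rw [dict_contains_erase, hr1m]
        by_cases hzx : z = x
        · subst hzx; simp [hx0]
        · simp [hzx]
      · have hx1 : x ∈ s' ++ [e] := by
          by_contra hx
          have h1 : (s' ++ [e]).count x = 0 := List.count_eq_zero.mpr hx
          exact h0 (by rw [hr1c x, h1]; simp)
        rw [hr1m z]
        constructor
        · rintro (rfl | hmem) <;> [exact hx1; exact hmem]
        · exact Or.inr
    -- sizes
    have hszL : left'.size = cardL (p ++ [x]) := dict_size_eq_cardL left' _ hLnd' hL'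
    have hszR : right'.size = cardL (s' ++ [e]) := dict_size_eq_cardL right' _ hR'nd hR'm
    rw [ih e (p ++ [x]) left' right' _ hLnd' hL' hR'nd hR'c hR'm]
    -- countP bookkeeping
    have hlen : (x :: s').length = s'.length + 1 := rfl
    rw [hlen, List.range_succ_eq_map, List.countP_cons, List.countP_map]
    have hpred : ((fun j => cardL (p ++ (x :: s').take (j+1)) == cardL ((x :: s').drop (j+1) ++ [e])) ∘ Nat.succ)
        = (fun j => cardL ((p ++ [x]) ++ s'.take (j+1)) == cardL (s'.drop (j+1) ++ [e])) := by
      funext j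
      simp [Function.comp, List.take_succ_cons, List.drop_succ_cons, List.append_assoc]
    rw [hpred, hszL, hszR]
    have hhead : (cardL (p ++ (x :: s').take (0+1)) == cardL ((x :: s').drop (0+1) ++ [e]))
        = (cardL (p ++ [x]) == cardL (s' ++ [e])) := by simp
    rw [hhead]
    by_cases hc : cardL (p ++ [x]) = cardL (s' ++ [e])
    · rw [if_pos hc]
      simp [hc]
      ring
    · rw [if_neg hc]
      have : (cardL (p ++ [x]) == cardL (s' ++ [e])) = false := by simpa using hc
      simp [this]

-- ---- B's backward (suffix-table) and forward (prefix-set) passes ----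
lemma B_rev (l : List Int) : ∀ (s : PySem.Set Int) (acc : List Int),
    (l.foldl solnStepRev (s, acc)).2
      = acc ++ (List.range l.length).map (fun j => PySem.Set.len (s.update (l.take j))) := by
  induction l with
  | nil => intro s acc; simp
  | cons x l' ih =>
    intro s acc
    rw [List.foldl_cons]
    have hstep : solnStepRev (s, acc) x = (s.add x, acc ++ [PySem.Set.len s]) := rfl
    rw [hstep, ih]
    rw [List.length_cons, List.range_succ_eq_map, List.map_cons, List.map_map]
    have h0 : PySem.Set.len ((s.update ((x :: l').take 0))) = PySem.Set.len s := by
      simp [PySem.Set.update_nil]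
    have hsh : ((fun j => PySem.Set.len (s.update ((x :: l').take j))) ∘ Nat.succ)
        = (fun j => PySem.Set.len ((s.add x).update (l'.take j))) := by
      funext j
      simp [Function.comp, List.take_succ_cons, PySem.Set.update_cons]
    rw [hsh, h0]
    simp

lemma B_fw (l : List (Int × Int)) : ∀ (p : List Int) (a : Int),
    (l.foldl solnStepFw (PySem.Set.ofList p, a)).2
      = a + ((List.range l.length).countP
          (fun j => PySem.Set.len (PySem.Set.ofList (p ++ (l.map Prod.fst).take (j+1)))
                      == (l.map Prod.snd).getD j 0) : Nat) := by
  induction l with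
  | nil => intro p a; simp
  | cons xd l' ih =>
    intro p a
    rw [List.foldl_cons]
    have hstep : solnStepFw (PySem.Set.ofList p, a) xd
        = (PySem.Set.ofList (p ++ [xd.1]),
           if PySem.Set.len (PySem.Set.ofList (p ++ [xd.1])) = xd.2 then a + 1 else a) := by
      simp [solnStepFw, PySem.Set.ofList_append_singleton]
    rw [hstep, ih]
    rw [List.length_cons, List.range_succ_eq_map, List.countP_cons, List.countP_map]
    have hsh : ((fun j => PySem.Set.len (PySem.Set.ofList (p ++ ((xd :: l').map Prod.fst).take (j+1)))
                      == ((xd :: l').map Prod.snd).getD j 0) ∘ Nat.succ)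
        = (fun j => PySem.Set.len (PySem.Set.ofList ((p ++ [xd.1]) ++ (l'.map Prod.fst).take (j+1)))
                      == (l'.map Prod.snd).getD j 0) := by
      funext j
      simp [Function.comp, List.take_succ_cons, List.append_assoc]
    rw [hsh]
    have hhead : (PySem.Set.len (PySem.Set.ofList (p ++ ((xd :: l').map Prod.fst).take (0+1)))
                      == ((xd :: l').map Prod.snd).getD 0 0)
        = (PySem.Set.len (PySem.Set.ofList (p ++ [xd.1])) == xd.2) := by
      simp
    rw [hhead]
    by_cases hc : PySem.Set.len (PySem.Set.ofList (p ++ [xd.1])) = xd.2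
    · rw [if_pos hc]
      have hb : (PySem.Set.len (PySem.Set.ofList (p ++ [xd.1])) == xd.2) = true := by
        simpa using hc
      rw [hb]
      norm_num
      ring
    · rw [if_neg hc]
      have hb : (PySem.Set.len (PySem.Set.ofList (p ++ [xd.1])) == xd.2) = false := by
        simpa using hc
      rw [hb]
      norm_num

lemma ref_shift (t : List Int) (h : t ≠ []) :
    ((List.range t.dropLast.length).countP
        (fun j => cardL ([] ++ t.dropLast.take (j+1))
            == cardL (t.dropLast.drop (j+1) ++ [t.getLast h])) : Int)
      = refCount t := by
  unfold refCount
  rw [List.length_dropLast]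
  congr 1
  apply List.countP_congr
  intro j hj
  rw [List.mem_range] at hj
  have hle : j + 1 ≤ t.dropLast.length := by
    rw [List.length_dropLast]; omega
  have hsplit : t.dropLast ++ [t.getLast h] = t := List.dropLast_append_getLast h
  have htake : t.dropLast.take (j+1) = t.take (j+1) := by
    conv_rhs => rw [← hsplit]
    rw [List.take_append_of_le_length hle]
  have hdrop : t.dropLast.drop (j+1) ++ [t.getLast h] = t.drop (j+1) := by
    conv_rhs => rw [← hsplit]
    rw [List.drop_append_of_le_length hle]
  rw [List.nil_append, htake, hdrop]


lemma solution_eq_ref (t : List Int) : solution t = refCount t := by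
  by_cases h : t = []
  · subst h; rfl
  · have hn : 1 ≤ t.length := List.length_pos_iff.mpr h
    have hcast : (t.length : Int) - 1 = (t.dropLast.length : Int) := by
      rw [List.length_dropLast]
      push_cast [Nat.cast_sub hn]
      ring
    simp only [solution]
    rw [hcast]
    rw [PySem.List.foldl_congr_mem _ _
        (fun st i => solnStepA st (PySem.List.pyGetD t.dropLast i 0)) _ ?_]
    · rw [PySem.List.foldl_pyRange_pyGetD' t.dropLast 0 solnStepA _ le_rfl]
      rw [Int.toNat_zero, List.drop_zero]
      have hsplit : t.dropLast ++ [t.getLast h] = t := List.dropLast_append_getLast h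
      rw [A_loop t.dropLast (t.getLast h) [] _ _ 0
        (by simp [PySem.Dict.keys_empty])
        (by intro x; simp [PySem.Dict.contains_empty])
        (PySem.Dict.nodup_keys_counter t)
        (by intro x; rw [PySem.Dict.getD_counter, hsplit])
        (by intro x; rw [PySem.Dict.contains_counter, hsplit]; exact List.contains_iff_mem)]
      rw [zero_add]
      exact ref_shift t h
    · intro st i hi
      rw [PySem.List.mem_pyRange_one] at hi
      obtain ⟨h0, h1⟩ := hi
      show solnStepA st (PySem.List.pyGetD t i 0)
          = solnStepA st (PySem.List.pyGetD t.dropLast i 0)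
      have hdl : t.dropLast.length = t.length - 1 := List.length_dropLast
      have hlt' : (i : Int) < (t.length : Int) := by rw [hdl] at h1; omega
      rw [PySem.List.pyGetD_eq_getElem t 0 h0 hlt',
          PySem.List.pyGetD_eq_getElem t.dropLast 0 h0 h1]
      rw [List.getElem_dropLast]

lemma solution_alt_eq_ref (t : List Int) : solution_alt t = refCount t := by
  by_cases h : t = []
  · subst h; rfl
  · simp only [solution_alt, PySem.List.slice_to_neg_one]
    rw [B_rev t.reverse PySem.Set.empty []]
    simp only [List.nil_append, List.length_reverse, PySem.Set.update_empty]
    set n := t.length with hn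
    set ds := (((List.range n).map
        (fun j => PySem.Set.len (PySem.Set.ofList (t.reverse.take j))))).reverse with hds
    have hdsl : ds.length = n := by simp [hds]
    have hysl : t.dropLast.length = n - 1 := List.length_dropLast
    have hzl : (t.dropLast.zip ds).length = n - 1 := by
      rw [List.length_zip, hdsl, hysl]; omega
    have hfst : (t.dropLast.zip ds).map Prod.fst = t.dropLast :=
      List.map_fst_zip (by rw [hdsl, hysl]; omega)
    rw [show (PySem.Set.empty : PySem.Set Int) = PySem.Set.ofList [] from rfl]
    rw [B_fw (t.dropLast.zip ds) [] 0, zero_add]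
    unfold refCount
    congr 1
    rw [hzl]
    apply List.countP_congr
    intro j hj
    rw [List.mem_range] at hj
    have hjy : j < t.dropLast.length := by omega
    have hjz : j < (t.dropLast.zip ds).length := by omega
    have hjm : j < ((t.dropLast.zip ds).map Prod.snd).length := by
      rw [List.length_map]; omega
    -- left side of ==
    have htake : (((t.dropLast.zip ds).map Prod.fst).take (j+1)) = t.take (j+1) := by
      rw [hfst, List.dropLast_eq_take, List.take_take]
      congr 1
      omega
    -- right side of ==
    have hsnd : ((t.dropLast.zip ds).map Prod.snd).getD j 0 = ds.getD j 0 := by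
      rw [List.getD_eq_getElem _ _ hjm, List.getElem_map, List.getElem_zip,
          List.getD_eq_getElem _ _ (by rw [hdsl]; omega)]
    have hdsj : ds.getD j 0 = PySem.Set.len (PySem.Set.ofList ((t.drop (j+1)).reverse)) := by
      rw [hds]
      have hjlen : j < ((List.range n).map
          (fun j => PySem.Set.len (PySem.Set.ofList (t.reverse.take j)))).reverse.length := by
        simp only [List.length_reverse, List.length_map, List.length_range]; omega
      rw [List.getD_eq_getElem _ _ hjlen, List.getElem_reverse, List.getElem_map,
          List.getElem_range]
      simp only [List.length_map, List.length_range]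
      congr 1
      rw [List.reverse_drop]
      congr 1
      show List.take (t.length - 1 - j) t.reverse = List.take (t.length - (j + 1)) t.reverse
      congr 1
      omega
    rw [List.nil_append, htake, hsnd, hdsj]
    have hlen1 : PySem.Set.len (PySem.Set.ofList (t.take (j+1))) = (cardL (t.take (j+1)) : Int) := rfl
    have hlen2 : PySem.Set.len (PySem.Set.ofList ((t.drop (j+1)).reverse))
        = (cardL (t.drop (j+1)) : Int) := by
      show ((cardL ((t.drop (j+1)).reverse) : Int)) = _
      rw [cardL_reverse]
    rw [hlen1, hlen2]
    simp [Nat.cast_inj]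

-- ===== VERDICT (by name: the statement is the Claim_ definition above) =====
theorem solution_spec : Claim_equal_solution := by
  intro t _
  unfold Spec_solution
  rw [solution_eq_ref, solution_alt_eq_ref]
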